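-- pv_equiv track=rewrite | github.com/afonsocrg/RSACypherMachine | lib/mathRSA.py | powerOfTwo
-- ===== SOURCE A (Python) =====
-- def powerOfTwo(number, factors):
-- 	if number == 0:
-- 		return factors
-- 	else:
-- 		prev = 1
-- 		test = 2
-- 		#Find greatest power of 2 that is lesser than number
-- 		while test <= number:
-- 			prev = test
-- 			test *= 2
--
-- 		return powerOfTwo(number-prev, [prev] + factors)
-- ===== SOURCE B (Python) =====
-- def powerOfTwo(number, factors):
--     # Single pass over the bits of number: collect 2^i for each set bit,
--     # in ascending order, then prepend to factors.
--     powers = []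
--     n = number
--     p = 1
--     while n > 0:
--         if n & 1:
--             powers.append(p)
--         n >>= 1
--         p <<= 1
--     return powers + factors
-- ===== Notes on version B (the rewrite author's own statement) =====
-- stated objective: faster
-- what changed: Replaces the recursive greatest-power-of-two search (a fresh doubling loop per recursion step) with a single pass over the bits of number that collects 2^i for every set bit.
import Mathlib
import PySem

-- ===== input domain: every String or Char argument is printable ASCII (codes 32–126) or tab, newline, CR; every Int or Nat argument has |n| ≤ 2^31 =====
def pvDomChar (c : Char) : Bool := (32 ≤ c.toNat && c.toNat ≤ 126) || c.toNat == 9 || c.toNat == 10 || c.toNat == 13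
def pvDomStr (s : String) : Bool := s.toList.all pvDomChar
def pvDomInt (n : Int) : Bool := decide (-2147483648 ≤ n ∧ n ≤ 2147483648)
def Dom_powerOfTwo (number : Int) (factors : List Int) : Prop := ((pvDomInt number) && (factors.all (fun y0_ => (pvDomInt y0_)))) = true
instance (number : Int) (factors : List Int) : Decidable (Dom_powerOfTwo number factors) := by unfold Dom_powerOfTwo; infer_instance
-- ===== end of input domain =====

-- B replaces A's per-step doubling search for the greatest power of two with a single
-- pass over the bits of number (asymptotically faster).


-- ===== PORT A =====
-- measure lemmas cited by name in the ports' decreasing_by clauses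
theorem pvMeasureLt (number test : Int) (h1 : 0 < test) (h2 : test ≤ number) :
    (number + 1 - 2 * test).toNat < (number + 1 - test).toNat := by omega

theorem pvSubLt (number prev : Int) (h0 : ¬ number = 0) (h1 : ¬ number < 0)
    (hp : 0 < prev) : (number - prev).toNat < number.toNat := by omega

theorem pvHalfLt (n : Int) (h : 0 < n) : (PySem.Int.floordiv n 2).toNat < n.toNat := by
  rw [PySem.Int.floordiv_eq_ediv_of_pos (by omega)]
  omega

-- the `while test <= number: prev = test; test *= 2` loop; the `0 < test` conjunct is a
-- totality guard only (test starts at 2 and doubles, so it always holds on real calls)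
def findPrev (number prev test : Int) : Int :=
  if h : 0 < test ∧ test ≤ number then findPrev number test (2 * test) else prev
termination_by (number + 1 - test).toNat
decreasing_by exact pvMeasureLt number test h.1 h.2

-- termination helper for the port (cited by decreasing_by): the loop's result is positive
theorem findPrev_pos (number prev test : Int) (h1 : 0 < prev) :
    0 < findPrev number prev test := by
  rw [findPrev]
  split_ifs with h
  · exact findPrev_pos number test (2 * test) h.1
  · exact h1
termination_by (number + 1 - test).toNat
decreasing_by exact pvMeasureLt number test h.1 h.2

-- Python A recurses without bound for number < 0 (RecursionError): that branch is a
-- totality guard only, outside Pre_powerOfTwo.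
def powerOfTwo (number : Int) (factors : List Int) : List Int :=
  if h0 : number = 0 then factors
  else if h : number < 0 then factors
  else
    let prev := findPrev number 1 2
    powerOfTwo (number - prev) ([prev] ++ factors)
termination_by number.toNat
decreasing_by exact pvSubLt number _ h0 h (findPrev_pos number 1 2 one_pos)

-- ===== PORT B =====
-- the `while n > 0` loop of Source B: emit p on a set low bit, shift n right, double p
def collectBits (n p : Int) : List Int :=
  if h : 0 < n then
    (if PySem.Int.mod n 2 = 1 then [p] else []) ++
      collectBits (PySem.Int.floordiv n 2) (2 * p)
  else []
termination_by n.toNat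
decreasing_by exact pvHalfLt n h

def powerOfTwo_alt (number : Int) (factors : List Int) : List Int :=
  collectBits number 1 ++ factors

-- ===== PRECONDITION & SPEC =====
-- For number < 0, Python A recurses forever and dies with RecursionError; those inputs
-- are excluded.  A returns normally on every number ≥ 0.
def Pre_powerOfTwo (number : Int) (factors : List Int) : Prop := 0 ≤ number
instance (number : Int) (factors : List Int) : Decidable (Pre_powerOfTwo number factors) := by unfold Pre_powerOfTwo; infer_instance
def pvWitness_powerOfTwo : Int × List Int := (13, [7, 7])

def Spec_powerOfTwo (number : Int) (factors : List Int) (out : List Int) : Prop := out = powerOfTwo_alt number factors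
instance (number : Int) (factors : List Int) (out : List Int) : Decidable (Spec_powerOfTwo number factors out) := by unfold Spec_powerOfTwo; infer_instance

-- ===== CLAIM (what is proved, stated in full; the proofs are below) =====
def Claim_equal_powerOfTwo : Prop := ∀ (number : Int) (factors : List Int), Dom_powerOfTwo number factors → Pre_powerOfTwo number factors → Spec_powerOfTwo number factors (powerOfTwo number factors)

-- ===== LEMMAS AND PROOFS =====

-- the while loop's result stays in (0, number]
theorem findPrev_bounds (number prev test : Int) (h1 : 0 < prev) (h2 : prev ≤ number) :
    0 < findPrev number prev test ∧ findPrev number prev test ≤ number := by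
  rw [findPrev]
  split_ifs with h
  · exact findPrev_bounds number test (2 * test) h.1 h.2
  · exact ⟨h1, h2⟩
termination_by (number + 1 - test).toNat
decreasing_by exact pvMeasureLt number test h.1 h.2

theorem collectBits_nil (n p : Int) (h : n ≤ 0) : collectBits n p = [] := by
  rw [collectBits, dif_neg (by omega)]

-- uniform unfolding of collectBits on nonnegative input, in plain `/` `%` form
theorem collectBits_unfold (n p : Int) (h : 0 ≤ n) :
    collectBits n p = (if n % 2 = 1 then [p] else []) ++ collectBits (n / 2) (2 * p) := by
  rcases lt_or_eq_of_le h with h' | h'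
  · rw [collectBits, dif_pos h', PySem.Int.mod_eq_emod_of_pos (by omega),
      PySem.Int.floordiv_eq_ediv_of_pos (by omega)]
  · rw [← h']
    simp [collectBits_nil]

-- adding a power of two above all set bits appends that power to the bit list
theorem collectBits_add_pow (k : ℕ) : ∀ (m p : Int), 0 ≤ m → m < 2 ^ k →
    collectBits (m + 2 ^ k) p = collectBits m p ++ [p * 2 ^ k] := by
  induction k with
  | zero =>
    intro m p h0 h1
    have hm : m = 0 := by omega
    subst hm
    rw [collectBits_unfold (0 + 2 ^ 0) p (by norm_num)]
    simp [collectBits_nil]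
  | succ k ih =>
    intro m p h0 h1
    have hpow : (0:Int) < 2 ^ k := by positivity
    have he : (2:Int) ^ (k + 1) = 2 * 2 ^ k := by ring
    rw [collectBits_unfold (m + 2 ^ (k + 1)) p (by omega),
        collectBits_unfold m p h0]
    have hmod : (m + 2 ^ (k + 1)) % 2 = m % 2 := by omega
    have hdiv : (m + 2 ^ (k + 1)) / 2 = m / 2 + 2 ^ k := by omega
    have h2p : 2 * p * 2 ^ k = p * 2 ^ (k + 1) := by ring
    rw [hmod, hdiv, ih (m / 2) (2 * p) (by omega) (by omega), List.append_assoc, h2p]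

-- the while loop returns prev·2^j, the greatest such power ≤ number
theorem findPrev_pow (number prev test : Int) (h1 : 0 < prev) (h2 : prev ≤ number)
    (h3 : test = 2 * prev) :
    ∃ k : ℕ, findPrev number prev test = prev * 2 ^ k ∧ prev * 2 ^ k ≤ number ∧
      number < prev * 2 ^ (k + 1) := by
  rw [findPrev]
  split_ifs with h
  · obtain ⟨k, hk1, hk2, hk3⟩ := findPrev_pow number test (2 * test) h.1 h.2 rfl
    refine ⟨k + 1, ?_, ?_, ?_⟩
    · rw [hk1, h3]; ring
    · calc prev * 2 ^ (k + 1) = test * 2 ^ k := by rw [h3]; ring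
        _ ≤ number := hk2
    · calc number < test * 2 ^ (k + 1) := hk3
        _ = prev * 2 ^ (k + 1 + 1) := by rw [h3]; ring
  · exact ⟨0, by norm_num, by norm_num [h2], by rw [pow_one]; omega⟩
termination_by (number + 1 - test).toNat
decreasing_by exact pvMeasureLt number test h.1 h.2

theorem powerOfTwo_eq (number : Int) (factors : List Int) (h : 0 ≤ number) :
    powerOfTwo number factors = collectBits number 1 ++ factors := by
  rw [powerOfTwo]
  split_ifs with h0 h1
  · rw [h0]
    simp [collectBits_nil]
  · omega
  · have hb := findPrev_bounds number 1 2 one_pos (by omega)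
    obtain ⟨k, hk1, hk2, hk3⟩ := findPrev_pow number 1 2 one_pos (by omega) (by ring)
    rw [one_mul] at hk1 hk2
    set r := findPrev number 1 2 with hr
    have hpow : (0:Int) < 2 ^ k := by positivity
    have h2k1 : (2:Int) ^ (k + 1) = 2 * 2 ^ k := by ring
    rw [powerOfTwo_eq (number - r) ([r] ++ factors) (by omega)]
    have key := collectBits_add_pow k (number - 2 ^ k) 1 (by omega) (by omega)
    rw [show number - 2 ^ k + 2 ^ k = number from by ring, one_mul] at key
    rw [key, hk1, List.append_assoc]
termination_by number.toNat
decreasing_by exact pvSubLt number _ h0 h1 (findPrev_pos number 1 2 one_pos)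

-- ===== VERDICT (by name: the statement is the Claim_ definition above) =====
theorem powerOfTwo_spec : Claim_equal_powerOfTwo := by
  intro number factors _ hpre
  unfold Spec_powerOfTwo powerOfTwo_alt
  exact powerOfTwo_eq number factors hpre
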